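-- pv_equiv track=rewrite | github.com/autom8ton/OLC-Python-TeachingMain | schoolpapers/task4_L1R5.py | call1r5
-- ===== SOURCE A (Python) =====
-- def getgradepoint(mark):
--     mark = int(mark)
--
--     if mark >= 75:
--         return 1
--     elif mark >= 70:
--         return 2
--     elif mark >= 65:
--         return 3
--     elif mark >= 60:
--         return 4
--     elif mark >= 55:
--         return 5
--     elif mark >= 50:
--         return 6
--     elif mark >= 45:
--         return 7
--     elif mark >= 40:
--         return 8
--     else:
--         return 9
--
-- def call1r5(result):
--     l1 = 0
--     r5 = 0
--
--     eng = result["English"]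
--     hchin = result["Higher Chinese"]
--     if eng > hchin or eng == hchin:
--         l1 = getgradepoint(result["English"])
--     else:
--         l1 = getgradepoint(result["Higher Chinese"])
--
--     for sub, grade in result.items():
--         if sub == "English" or sub == "Higher Chinese":
--             continue
--         else:
--             r5 = r5 + getgradepoint(grade)
--
--     return l1 + r5
-- ===== SOURCE B (Python) =====
-- def getgradepoint(mark):
--     # closed-form band lookup: 1 for >=75, 9 below 40, else arithmetic
--     mark = int(mark)
--     if mark >= 75:
--         return 1
--     if mark < 40:
--         return 9
--     return (74 - mark) // 5 + 2
--
-- def call1r5(result):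
--     total = sum(getgradepoint(g) for g in result.values())
--     eng = result["English"]
--     hchin = result["Higher Chinese"]
--     loser = hchin if (eng > hchin or eng == hchin) else eng
--     return total - getgradepoint(loser)
-- ===== Notes on version B (the rewrite author's own statement) =====
-- stated objective: alternative
-- what changed: B sums the grade points of ALL subjects in one pass and subtracts the grade point of the losing L1 mark (closed-form arithmetic band instead of the 9-way if-chain), instead of A's skip-two-keys loop plus a separately computed l1.
import Mathlib
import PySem

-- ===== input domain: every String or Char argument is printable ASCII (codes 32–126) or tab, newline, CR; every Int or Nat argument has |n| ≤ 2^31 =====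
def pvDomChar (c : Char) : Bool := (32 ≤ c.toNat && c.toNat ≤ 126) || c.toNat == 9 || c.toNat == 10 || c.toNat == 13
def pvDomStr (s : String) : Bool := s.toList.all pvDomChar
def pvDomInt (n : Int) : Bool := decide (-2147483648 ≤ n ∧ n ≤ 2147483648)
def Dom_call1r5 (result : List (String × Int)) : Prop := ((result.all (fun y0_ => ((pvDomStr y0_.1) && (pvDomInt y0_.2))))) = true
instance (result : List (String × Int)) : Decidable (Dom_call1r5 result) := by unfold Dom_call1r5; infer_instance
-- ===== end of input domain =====

-- B sums grade points over all subjects and subtracts the losing L1 mark's grade point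
-- (with a closed-form band formula), instead of A's skip-two-keys loop; objective: alternative decomposition.


-- ===== PORT A =====
def getgradepoint (mark : Int) : Int :=
  if mark ≥ 75 then 1
  else if mark ≥ 70 then 2
  else if mark ≥ 65 then 3
  else if mark ≥ 60 then 4
  else if mark ≥ 55 then 5
  else if mark ≥ 50 then 6
  else if mark ≥ 45 then 7
  else if mark ≥ 40 then 8
  else 9

-- dict indexing: KeyError (missing key) is excluded by Pre_call1r5; getD's default is never read there
def call1r5 (result : List (String × Int)) : Int :=
  let d := PySem.Dict.mk result
  let eng := d.getD "English" 0
  let hchin := d.getD "Higher Chinese" 0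
  let l1 := if eng > hchin || eng == hchin then getgradepoint (d.getD "English" 0)
            else getgradepoint (d.getD "Higher Chinese" 0)
  let r5 := d.items.foldl
    (fun r5 p => if p.1 == "English" || p.1 == "Higher Chinese" then r5 else r5 + getgradepoint p.2) 0
  l1 + r5

-- ===== PORT B =====
def getgradepointB (mark : Int) : Int :=
  if mark ≥ 75 then 1
  else if mark < 40 then 9
  else PySem.Int.floordiv (74 - mark) 5 + 2

def call1r5_alt (result : List (String × Int)) : Int :=
  let d := PySem.Dict.mk result
  let total := (d.values.map (fun g => getgradepointB g)).sum
  let eng := d.getD "English" 0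
  let hchin := d.getD "Higher Chinese" 0
  let loser := if eng > hchin || eng == hchin then hchin else eng
  total - getgradepointB loser

-- ===== PRECONDITION & SPEC =====
-- Pre_ requires both L1 keys to be present (A raises KeyError otherwise) and the association
-- list to have distinct keys, i.e. to actually encode a Python dict (A's argument is a dict,
-- which cannot carry duplicate keys).
def Pre_call1r5 (result : List (String × Int)) : Prop :=
  (result.map Prod.fst).Nodup ∧ "English" ∈ result.map Prod.fst ∧ "Higher Chinese" ∈ result.map Prod.fst
instance (result : List (String × Int)) : Decidable (Pre_call1r5 result) := by unfold Pre_call1r5; infer_instance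
def pvWitness_call1r5 : (List (String × Int)) :=
  [("English", 72), ("Higher Chinese", 64), ("Mathematics", 81)]
def Spec_call1r5 (result : List (String × Int)) (out : Int) : Prop := out = call1r5_alt result
instance (result : List (String × Int)) (out : Int) : Decidable (Spec_call1r5 result out) := by unfold Spec_call1r5; infer_instance

-- ===== CLAIM (what is proved, stated in full; the proofs are below) =====
def Claim_equal_call1r5 : Prop := ∀ (result : List (String × Int)), Dom_call1r5 result → Pre_call1r5 result → Spec_call1r5 result (call1r5 result)

-- ===== LEMMAS AND PROOFS =====

-- the two grade-point helpers agree everywhere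
theorem gp_eq (m : Int) : getgradepoint m = getgradepointB m := by
  unfold getgradepoint getgradepointB
  rw [PySem.Int.floordiv_eq_ediv_of_pos (by norm_num)]
  split_ifs <;> omega

-- A's skip loop as a filtered sum
theorem skip_fold (l : List (String × Int)) (c : Int) :
    l.foldl (fun r p => if p.1 == "English" || p.1 == "Higher Chinese" then r else r + getgradepoint p.2) c
      = c + ((l.filter (fun p => !(p.1 == "English" || p.1 == "Higher Chinese"))).map
              (fun p => getgradepoint p.2)).sum := by
  induction l generalizing c with
  | nil => simp
  | cons h t ih =>
      simp only [List.foldl_cons, List.filter_cons]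
      rw [ih]
      by_cases hk : (h.1 == "English" || h.1 == "Higher Chinese") = true
      · simp [hk]
      · simp [hk]
        ring

-- splitting a mapped sum along a Boolean predicate
theorem sum_split (p : String × Int → Bool) (f : String × Int → Int) (l : List (String × Int)) :
    (l.map f).sum = ((l.filter p).map f).sum + ((l.filter (fun x => !p x)).map f).sum := by
  induction l with
  | nil => simp
  | cons h t ih =>
      simp only [List.map_cons, List.sum_cons, List.filter_cons]
      by_cases hk : p h = true <;> simp [hk, ih] <;> ring

-- disjoint predicates split a filtered sum
theorem sum_filter_or (f : String × Int → Int) (a b : String × Int → Bool)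
    (hd : ∀ x, ¬(a x = true ∧ b x = true)) (l : List (String × Int)) :
    ((l.filter (fun x => a x || b x)).map f).sum
      = ((l.filter a).map f).sum + ((l.filter b).map f).sum := by
  induction l with
  | nil => simp
  | cons h t ih =>
      simp only [List.filter_cons]
      by_cases ha : a h = true
      · have hb : b h = false := by
          cases hbv : b h
          · rfl
          · exact absurd ⟨ha, hbv⟩ (hd h)
        simp [ha, hb, ih]
        ring
      · by_cases hb : b h = true
        · simp [ha, hb, ih]
          ring
        · simp [ha, hb, ih]

-- with distinct keys and k present, the entries keyed k are exactly one, holding the dict lookup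
theorem filter_single (k : String) (l : List (String × Int))
    (hnd : (l.map Prod.fst).Nodup) (hm : k ∈ l.map Prod.fst) :
    l.filter (fun p => p.1 == k) = [(k, (PySem.Dict.mk l).getD k 0)] := by
  induction l with
  | nil => simp at hm
  | cons h t ih =>
      obtain ⟨k', v⟩ := h
      simp only [List.map_cons, List.nodup_cons, List.mem_map] at hnd
      simp only [List.map_cons, List.mem_cons] at hm
      simp only [List.filter_cons, PySem.Dict.getD_eq_get?_getD, PySem.Dict.get?_mk_cons]
      by_cases hk : k' = k
      · subst hk
        have hnil : t.filter (fun p => p.1 == k') = [] := by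
          rw [List.filter_eq_nil_iff]
          intro a ha hc
          exact hnd.1 ⟨a, ha, by simpa using hc⟩
        simp [hnil]
      · have hm' : k ∈ t.map Prod.fst := by
          rcases hm with h1 | h1
          · exact absurd h1.symm hk
          · exact h1
        have hres := ih hnd.2 hm'
        simp only [PySem.Dict.getD_eq_get?_getD] at hres
        have hne : (k' == k) = false := by simp [hk]
        simp only [hne, Bool.false_eq_true, if_false]
        simpa using hres

-- B's one-pass total equals A's skipped sum plus the grade points of the two L1 subjects
theorem total_eq (l : List (String × Int))
    (hnd : (l.map Prod.fst).Nodup)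
    (hE : "English" ∈ l.map Prod.fst) (hH : "Higher Chinese" ∈ l.map Prod.fst) :
    ((l.map (fun x => x.2)).map (fun g => getgradepointB g)).sum
      = ((l.filter (fun p => !(p.1 == "English" || p.1 == "Higher Chinese"))).map
          (fun p => getgradepointB p.2)).sum
        + getgradepointB ((PySem.Dict.mk l).getD "English" 0)
        + getgradepointB ((PySem.Dict.mk l).getD "Higher Chinese" 0) := by
  have hcomp : ((fun g => getgradepointB g) ∘ fun x : String × Int => x.2)
      = (fun p : String × Int => getgradepointB p.2) := rfl
  have hdisj : ∀ x : String × Int,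
      ¬((x.1 == "English") = true ∧ (x.1 == "Higher Chinese") = true) := by
    intro x hx
    have h1 : x.1 = "English" := by simpa using hx.1
    have h2 : x.1 = "Higher Chinese" := by simpa using hx.2
    exact absurd (h1.symm.trans h2) (by decide)
  rw [List.map_map, hcomp,
      sum_split (fun p => p.1 == "English" || p.1 == "Higher Chinese")
        (fun p => getgradepointB p.2) l,
      sum_filter_or (fun p => getgradepointB p.2)
        (fun p => p.1 == "English") (fun p => p.1 == "Higher Chinese") hdisj l,
      filter_single "English" l hnd hE, filter_single "Higher Chinese" l hnd hH]
  simp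
  ring

-- ===== VERDICT (by name: the statement is the Claim_ definition above) =====
theorem call1r5_spec : Claim_equal_call1r5 := by
  intro result _ hpre
  obtain ⟨hnd, hE, hH⟩ := hpre
  unfold Spec_call1r5 call1r5 call1r5_alt
  simp only [PySem.Dict.values]
  rw [skip_fold]
  simp only [gp_eq]
  rw [total_eq result hnd hE hH]
  by_cases hcmp : ((PySem.Dict.mk result).getD "English" 0 > (PySem.Dict.mk result).getD "Higher Chinese" 0
      || (PySem.Dict.mk result).getD "English" 0 == (PySem.Dict.mk result).getD "Higher Chinese" 0) = true
  · simp only [hcmp, if_true]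
    ring
  · simp only [hcmp, Bool.false_eq_true, if_false]
    ring
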